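-- pv_equiv track=rewrite | github.com/salsachess/bracketing | main.py | league_phase_valid_participant_counts
-- ===== SOURCE A (Python) =====
-- def league_phase_valid_participant_counts(rounds: int) -> tuple[int, list[int]]:
--     """
--     Для League Phase при заданій кількості турів: дійсні кількості учасників.
--     Умови: n = (rounds+1)*k (k — дільник rounds); n парне (кожен тур по n/2 матчів, без баїв);
--     при одному матчі з кошика розмір кошика парний; (команд у кошику)×(матчів з кошика) парне.
--     Повертає (мінімум_учасників, відсортований список допустимих n).
--     """
--     pot_size = rounds + 1
--     divisors = [d for d in range(1, rounds + 1) if rounds % d == 0]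
--     valid = []
--     for k in divisors:
--         n = pot_size * k
--         if n % 2 == 1:
--             continue  # тільки парна кількість: кожен тур по n/2 матчів, інакше не вмістити в rounds турів
--         n_pots = n // pot_size
--         k_per_pot = rounds // n_pots
--         if k_per_pot == 1 and pot_size % 2 == 1:
--             continue  # заборонено: один матч з кошика при непарному розмірі кошика
--         if n_pots == 1 and pot_size % 2 == 1:
--             continue  # один кошик з непарним числом: не вмістити всі матчі в rounds турів без баїв
--         if (pot_size * k_per_pot) % 2 == 1:
--             continue  # неціла кількість матчів у кошику (27.5 тощо)
--         valid.append(n)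
--     return (min(valid) if valid else 0, sorted(valid))
-- ===== SOURCE B (Python) =====
-- def league_phase_valid_participant_counts(rounds: int) -> tuple[int, list[int]]:
--     if rounds <= 0:
--         return (0, [])
--     pot_size = rounds + 1
--     # enumerate divisors of rounds by trial division up to sqrt(rounds)
--     divs = set()
--     d = 1
--     while d * d <= rounds:
--         if rounds % d == 0:
--             divs.add(d)
--             divs.add(rounds // d)
--         d += 1
--     valid = []
--     for k in sorted(divs):
--         n = pot_size * k
--         if n % 2 == 1:
--             continue
--         k_per_pot = rounds // k
--         if k_per_pot == 1 and pot_size % 2 == 1: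
--             continue
--         if k == 1 and pot_size % 2 == 1:
--             continue
--         if (pot_size * k_per_pot) % 2 == 1:
--             continue
--         valid.append(n)
--     # divisors were visited in increasing order and pot_size > 0, so valid is already sorted
--     return (valid[0] if valid else 0, valid)
-- ===== Notes on version B (the rewrite author's own statement) =====
-- stated objective: faster
-- what changed: B enumerates the divisors of rounds by trial division up to sqrt(rounds) into a set and sorts them, instead of scanning every integer from 1 to rounds; it then reads the minimum as the head of the already-sorted valid list instead of calling min and sorted.
import Mathlib
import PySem

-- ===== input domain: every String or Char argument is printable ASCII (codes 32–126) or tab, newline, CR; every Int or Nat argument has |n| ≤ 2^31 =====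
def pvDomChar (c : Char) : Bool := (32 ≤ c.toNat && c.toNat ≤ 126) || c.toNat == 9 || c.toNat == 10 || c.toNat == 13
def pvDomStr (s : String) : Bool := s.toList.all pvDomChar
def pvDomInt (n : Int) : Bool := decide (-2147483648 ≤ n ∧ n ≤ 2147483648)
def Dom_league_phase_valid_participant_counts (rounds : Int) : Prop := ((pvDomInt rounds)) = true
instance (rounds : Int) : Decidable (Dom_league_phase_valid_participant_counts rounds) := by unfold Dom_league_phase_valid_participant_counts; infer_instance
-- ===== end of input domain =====

-- B replaces A's 1..rounds scan for divisors by trial division up to sqrt(rounds) (objective: faster).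

-- ===== PORT A =====
def league_phase_valid_participant_counts (rounds : Int) : Int × List Int :=
  let pot_size := rounds + 1
  let divisors := (PySem.List.pyRange 1 (rounds + 1) 1).filter (fun d => PySem.Int.mod rounds d == 0)
  let valid := divisors.foldl (fun valid k =>
    let n := pot_size * k
    if PySem.Int.mod n 2 == 1 then valid
    else
      let n_pots := PySem.Int.floordiv n pot_size
      let k_per_pot := PySem.Int.floordiv rounds n_pots
      if k_per_pot == 1 && PySem.Int.mod pot_size 2 == 1 then valid
      else if n_pots == 1 && PySem.Int.mod pot_size 2 == 1 then valid
      else if PySem.Int.mod (pot_size * k_per_pot) 2 == 1 then valid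
      else valid ++ [n]) []
  ((match PySem.List.min? valid (fun x => x) with
    | some m => m
    | none => 0),
   PySem.List.sorted valid (fun x => x))

-- ===== PORT B =====
-- the while-loop of Source B; d starts at 1 and only increments, so a Nat counter (cast to
-- Int where the Python uses its value) is exact; fuel = rounds.toNat + 1 bounds the
-- iteration count (d*d ≤ rounds forces d ≤ rounds.toNat) and only makes the same
-- computation total by structural recursion.
def pvDivLoop (rounds : Int) (fuel : Nat) (d : Nat) (s : PySem.Set Int) : PySem.Set Int :=
  match fuel with
  | 0 => s
  | fuel + 1 =>
    if (d : Int) * (d : Int) ≤ rounds then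
      pvDivLoop rounds fuel (d + 1)
        (if PySem.Int.mod rounds (d : Int) == 0 then
          (s.add (d : Int)).add (PySem.Int.floordiv rounds (d : Int))
        else s)
    else s

def league_phase_valid_participant_counts_alt (rounds : Int) : Int × List Int :=
  if rounds ≤ 0 then (0, [])
  else
    let pot_size := rounds + 1
    let divs := pvDivLoop rounds (rounds.toNat + 1) 1 (PySem.Set.ofList [])
    let valid := (PySem.List.sorted (divs : List Int) (fun x => x)).foldl (fun valid k =>
      let n := pot_size * k
      if PySem.Int.mod n 2 == 1 then valid
      else
        let k_per_pot := PySem.Int.floordiv rounds k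
        if k_per_pot == 1 && PySem.Int.mod pot_size 2 == 1 then valid
        else if k == 1 && PySem.Int.mod pot_size 2 == 1 then valid
        else if PySem.Int.mod (pot_size * k_per_pot) 2 == 1 then valid
        else valid ++ [n]) []
    ((match valid with
      | [] => 0
      | x :: _ => x),
     valid)

-- ===== PRECONDITION & SPEC =====
def Spec_league_phase_valid_participant_counts (rounds : Int) (out : Int × List Int) : Prop := out = league_phase_valid_participant_counts_alt rounds
instance (rounds : Int) (out : Int × List Int) : Decidable (Spec_league_phase_valid_participant_counts rounds out) := by unfold Spec_league_phase_valid_participant_counts; infer_instance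

-- ===== CLAIM (what is proved, stated in full; the proofs are below) =====
def Claim_equal_league_phase_valid_participant_counts : Prop := ∀ (rounds : Int), Dom_league_phase_valid_participant_counts rounds → Spec_league_phase_valid_participant_counts rounds (league_phase_valid_participant_counts rounds)

-- ===== LEMMAS AND PROOFS =====

-- A's divisor list, and the two loop bodies, named for the proofs
def pvDivList (rounds : Int) : List Int :=
  (PySem.List.pyRange 1 (rounds + 1) 1).filter (fun d => PySem.Int.mod rounds d == 0)

def pvBodyA (rounds : Int) (valid : List Int) (k : Int) : List Int :=
  let pot_size := rounds + 1
  let n := pot_size * k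
  if PySem.Int.mod n 2 == 1 then valid
  else
    let n_pots := PySem.Int.floordiv n pot_size
    let k_per_pot := PySem.Int.floordiv rounds n_pots
    if k_per_pot == 1 && PySem.Int.mod pot_size 2 == 1 then valid
    else if n_pots == 1 && PySem.Int.mod pot_size 2 == 1 then valid
    else if PySem.Int.mod (pot_size * k_per_pot) 2 == 1 then valid
    else valid ++ [n]

def pvBodyB (rounds : Int) (valid : List Int) (k : Int) : List Int :=
  let pot_size := rounds + 1
  let n := pot_size * k
  if PySem.Int.mod n 2 == 1 then valid
  else
    let k_per_pot := PySem.Int.floordiv rounds k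
    if k_per_pot == 1 && PySem.Int.mod pot_size 2 == 1 then valid
    else if k == 1 && PySem.Int.mod pot_size 2 == 1 then valid
    else if PySem.Int.mod (pot_size * k_per_pot) 2 == 1 then valid
    else valid ++ [n]

def pvP (rounds k : Int) : Bool :=
  !(PySem.Int.mod ((rounds + 1) * k) 2 == 1)
  && !(PySem.Int.floordiv rounds k == 1 && PySem.Int.mod (rounds + 1) 2 == 1)
  && !(k == 1 && PySem.Int.mod (rounds + 1) 2 == 1)
  && !(PySem.Int.mod ((rounds + 1) * PySem.Int.floordiv rounds k) 2 == 1)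

lemma pvA_eq (rounds : Int) : league_phase_valid_participant_counts rounds =
    ((match PySem.List.min? (List.foldl (pvBodyA rounds) [] (pvDivList rounds)) (fun x => x) with
      | some m => m
      | none => 0),
     PySem.List.sorted (List.foldl (pvBodyA rounds) [] (pvDivList rounds)) (fun x => x)) := rfl

lemma pvB_eq (rounds : Int) (h : ¬ rounds ≤ 0) : league_phase_valid_participant_counts_alt rounds =
    ((match List.foldl (pvBodyB rounds) []
        (PySem.List.sorted (pvDivLoop rounds (rounds.toNat + 1) 1 (PySem.Set.ofList []) : List Int) (fun x => x)) with
      | [] => 0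
      | x :: _ => x),
     List.foldl (pvBodyB rounds) []
        (PySem.List.sorted (pvDivLoop rounds (rounds.toNat + 1) 1 (PySem.Set.ofList []) : List Int) (fun x => x))) := by
  rw [league_phase_valid_participant_counts_alt, if_neg h]
  rfl

lemma pvDivList_mem (rounds x : Int) :
    x ∈ pvDivList rounds ↔ (1 ≤ x ∧ x ≤ rounds ∧ PySem.Int.mod rounds x = 0) := by
  simp [pvDivList, List.mem_filter, PySem.List.mem_pyRange_one]
  omega

lemma pyRange_one_nil (a b : Int) (h : b ≤ a) : PySem.List.pyRange a b 1 = [] := by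
  simp [PySem.List.pyRange, show ¬ a < b by omega]

lemma pyRange_one_pairwise (a b : Int) : (PySem.List.pyRange a b 1).Pairwise (· < ·) := by
  simp only [PySem.List.pyRange, if_neg (by norm_num : ¬ (1 : Int) = 0), List.pairwise_map]
  exact List.pairwise_lt_range.imp (by intro x y hxy; omega)

lemma pvDivList_pairwise (rounds : Int) : (pvDivList rounds).Pairwise (· < ·) :=
  (pyRange_one_pairwise 1 (rounds + 1)).filter _

lemma pvDivList_nodup (rounds : Int) : (pvDivList rounds).Nodup :=
  (pvDivList_pairwise rounds).imp (fun h => ne_of_lt h)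

lemma pvDivLoop_nodup (rounds : Int) (fuel : Nat) : ∀ (d : Nat) (s : PySem.Set Int),
    List.Nodup s → List.Nodup (pvDivLoop rounds fuel d s) := by
  induction fuel with
  | zero => intro d s hs; exact hs
  | succ fuel ih =>
    intro d s hs
    rw [pvDivLoop]
    split
    · apply ih
      split
      · exact PySem.Set.nodup_add _ _ (PySem.Set.nodup_add _ _ hs)
      · exact hs
    · exact hs

lemma pvDivLoop_mem (rounds : Int) (fuel : Nat) : ∀ (d : Nat) (s : PySem.Set Int) (x : Int),
    (∀ e : Nat, (e : Int) * e ≤ rounds → e < d + fuel) →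
    (x ∈ (pvDivLoop rounds fuel d s : List Int) ↔
      x ∈ (s : List Int) ∨ ∃ e : Nat, d ≤ e ∧ (e : Int) * e ≤ rounds ∧
        PySem.Int.mod rounds e = 0 ∧ (x = e ∨ x = PySem.Int.floordiv rounds e)) := by
  induction fuel with
  | zero =>
    intro d s x hf
    rw [pvDivLoop]
    constructor
    · exact Or.inl
    · rintro (hx | ⟨e, he, h1, _, _⟩)
      · exact hx
      · exact absurd (hf e h1) (by omega)
  | succ fuel ih =>
    intro d s x hf
    rw [pvDivLoop]
    split
    · rename_i h
      rw [ih (d + 1) _ x (fun e he => by have := hf e he; omega)]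
      constructor
      · rintro (hx | ⟨e, he, h1, h2, h3⟩)
        · split at hx
          · rename_i hmod
            rw [PySem.Set.mem_add, PySem.Set.mem_add] at hx
            rcases hx with (hx | hx) | hx
            · exact Or.inl hx
            · exact Or.inr ⟨d, le_refl _, h, by simpa using hmod, Or.inl hx⟩
            · exact Or.inr ⟨d, le_refl _, h, by simpa using hmod, Or.inr hx⟩
          · exact Or.inl hx
        · exact Or.inr ⟨e, by omega, h1, h2, h3⟩
      · rintro (hx | ⟨e, he, h1, h2, h3⟩)
        · left
          split
          · rw [PySem.Set.mem_add, PySem.Set.mem_add]; exact Or.inl (Or.inl hx)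
          · exact hx
        · rcases Nat.eq_or_lt_of_le he with rfl | hlt
          · left
            split
            · rw [PySem.Set.mem_add, PySem.Set.mem_add]
              rcases h3 with h3 | h3
              · exact Or.inl (Or.inr h3)
              · exact Or.inr h3
            · rename_i hmod; simp at hmod; exact absurd h2 hmod
          · exact Or.inr ⟨e, by omega, h1, h2, h3⟩
    · rename_i h
      constructor
      · exact Or.inl
      · rintro (hx | ⟨e, he, h1, h2, h3⟩)
        · exact hx
        · exfalso
          apply h
          have hde : (d : Int) ≤ e := by exact_mod_cast he
          nlinarith [Int.natCast_nonneg e, Int.natCast_nonneg d]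

-- the divisor set computed by the sqrt-loop has exactly A's divisors as its members
lemma pvDivLoop_mem_iff (rounds : Int) (hr : 1 ≤ rounds) (x : Int) :
    x ∈ (pvDivLoop rounds (rounds.toNat + 1) 1 (PySem.Set.ofList []) : List Int) ↔ x ∈ pvDivList rounds := by
  rw [pvDivLoop_mem rounds (rounds.toNat + 1) 1 _ x ?hf, pvDivList_mem]
  case hf =>
    intro e he
    rcases Nat.eq_zero_or_pos e with h0 | h0
    · omega
    · have h1 : (1 : Int) ≤ (e : Int) := by exact_mod_cast h0
      have h2 : (e : Int) ≤ rounds := le_trans (by nlinarith) he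
      omega
  constructor
  · rintro (hx | ⟨e, he, h1, h2, h3⟩)
    · simp at hx
    · have he1 : (1 : Int) ≤ (e : Int) := by exact_mod_cast he
      have hee : (e : Int) ≤ rounds := by nlinarith
      have hdvd : (e : Int) ∣ rounds := (PySem.Int.mod_eq_zero_iff_dvd _ _).mp h2
      rcases h3 with rfl | rfl
      · exact ⟨he1, hee, h2⟩
      · rw [PySem.Int.floordiv_eq_ediv_of_pos (by omega)]
        obtain ⟨c, hc⟩ := hdvd
        have hc' : rounds / (e : Int) = c := by
          rw [hc]; exact Int.mul_ediv_cancel_left c (by omega)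
        have hcpos : 1 ≤ c := by nlinarith
        have hcle : c ≤ rounds := by nlinarith
        have hcdvd : c ∣ rounds := ⟨e, by rw [hc]; ring⟩
        rw [hc']
        exact ⟨hcpos, hcle, (PySem.Int.mod_eq_zero_iff_dvd _ _).mpr hcdvd⟩
  · rintro ⟨h1, h2, h3⟩
    right
    have hdvd : x ∣ rounds := (PySem.Int.mod_eq_zero_iff_dvd _ _).mp h3
    obtain ⟨c, hc⟩ := hdvd
    have hcpos : 1 ≤ c := by nlinarith
    by_cases hxx : x * x ≤ rounds
    · refine ⟨x.toNat, by omega, by rw [Int.toNat_of_nonneg (by omega)]; exact hxx,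
        by rw [Int.toNat_of_nonneg (by omega)]; exact h3,
        Or.inl (by rw [Int.toNat_of_nonneg (by omega)])⟩
    · have hcx : c < x := by nlinarith
      have hcc : c * c ≤ rounds := by nlinarith
      refine ⟨c.toNat, by omega, by rw [Int.toNat_of_nonneg (by omega)]; exact hcc, ?_, ?_⟩
      · rw [Int.toNat_of_nonneg (by omega)]
        exact (PySem.Int.mod_eq_zero_iff_dvd _ _).mpr ⟨x, by rw [hc]; ring⟩
      · right
        rw [Int.toNat_of_nonneg (by omega), PySem.Int.floordiv_eq_ediv_of_pos (by omega), hc,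
          mul_comm]
        exact (Int.mul_ediv_cancel_left x (by omega)).symm

lemma pvDivLoop_sorted_eq (rounds : Int) (hr : 1 ≤ rounds) :
    PySem.List.sorted (pvDivLoop rounds (rounds.toNat + 1) 1 (PySem.Set.ofList []) : List Int) (fun x => x)
      = pvDivList rounds := by
  apply PySem.List.sorted_eq_of_perm_of_pairwise_lt
  · rw [List.perm_ext_iff_of_nodup (pvDivList_nodup rounds)
      (pvDivLoop_nodup rounds (rounds.toNat + 1) 1 _ (PySem.Set.nodup_ofList []))]
    intro x
    exact (pvDivLoop_mem_iff rounds hr x).symm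
  · exact pvDivList_pairwise rounds

-- the two loop bodies agree on actual divisors (A's n_pots is just k again)
lemma pvBody_congr (rounds : Int) (hr : 1 ≤ rounds) (acc : List Int) (k : Int)
    (hk : k ∈ pvDivList rounds) : pvBodyA rounds acc k = pvBodyB rounds acc k := by
  have hk1 : 1 ≤ k := ((pvDivList_mem rounds k).mp hk).1
  have hnp : PySem.Int.floordiv ((rounds + 1) * k) (rounds + 1) = k := by
    rw [PySem.Int.floordiv_eq_ediv_of_pos (by omega)]
    exact Int.mul_ediv_cancel_left k (by omega)
  simp only [pvBodyA, pvBodyB, hnp]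

lemma pvBodyB_if (rounds : Int) (acc : List Int) (k : Int) :
    pvBodyB rounds acc k = if pvP rounds k then acc ++ [(rounds + 1) * k] else acc := by
  cases h1 : (PySem.Int.mod ((rounds + 1) * k) 2 == 1) <;>
  cases h2 : (PySem.Int.floordiv rounds k == 1) <;>
  cases h3 : (PySem.Int.mod (rounds + 1) 2 == 1) <;>
  cases h4 : (k == 1) <;>
  cases h5 : (PySem.Int.mod ((rounds + 1) * PySem.Int.floordiv rounds k) 2 == 1) <;>
  simp only [pvBodyB, pvP, h1, h2, h3, h4, h5] <;> rfl

lemma pvValid_eq_map (rounds : Int) :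
    List.foldl (pvBodyB rounds) [] (pvDivList rounds)
      = ((pvDivList rounds).filter (pvP rounds)).map (fun k => (rounds + 1) * k) := by
  rw [PySem.List.foldl_congr_mem (pvDivList rounds) (pvBodyB rounds)
    (fun acc k => if pvP rounds k then acc ++ [(rounds + 1) * k] else acc) []
    (fun acc k _ => pvBodyB_if rounds acc k)]
  exact PySem.List.foldl_append_if (pvP rounds) _ _ []

lemma pvValid_pairwise (rounds : Int) (hr : 1 ≤ rounds) :
    (List.foldl (pvBodyB rounds) [] (pvDivList rounds)).Pairwise (· < ·) := by
  rw [pvValid_eq_map]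
  apply List.Pairwise.map
  · intro a b hab
    exact mul_lt_mul_of_pos_left hab (by omega)
  · exact (pvDivList_pairwise rounds).filter _

-- min? of a ≤-sorted list is its head
lemma pvMinAux (t : List Int) : ∀ (m : Int), (∀ y ∈ t, m ≤ y) →
    PySem.List.min? (m :: t) (fun x => x) = some m := by
  induction t with
  | nil => intro m _; rfl
  | cons y t ih =>
    intro m hm
    have hym : ¬ y < m := not_lt.mpr (hm y List.mem_cons_self)
    have h1 : PySem.List.min? (m :: y :: t) (fun x => x)
        = PySem.List.min? (m :: t) (fun x => x) := by
      show List.foldl _ (if (y : Int) < m then some y else some m) t = List.foldl _ (some m) t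
      rw [if_neg hym]
    rw [h1]
    exact ih m (fun z hz => hm z (List.mem_cons_of_mem y hz))

lemma min?_of_pairwise (l : List Int) (hl : l.Pairwise (· ≤ ·)) :
    PySem.List.min? l (fun x => x) = l.head? := by
  cases l with
  | nil => rfl
  | cons x t => exact pvMinAux t x (fun y hy => (List.pairwise_cons.mp hl).1 y hy)

lemma pv_sorted_nil : PySem.List.sorted ([] : List Int) (fun x => x) = [] :=
  PySem.List.sorted_eq_self_of_pairwise [] _ List.Pairwise.nil

theorem pv_main (rounds : Int) :
    league_phase_valid_participant_counts rounds = league_phase_valid_participant_counts_alt rounds := by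
  by_cases hr : rounds ≤ 0
  · have h0 : pvDivList rounds = [] := by
      rw [pvDivList, pyRange_one_nil 1 (rounds + 1) (by omega)]; rfl
    rw [pvA_eq, league_phase_valid_participant_counts_alt, if_pos hr, h0]
    simp [PySem.List.min?, pv_sorted_nil]
  · have hr1 : (1 : Int) ≤ rounds := by omega
    rw [pvA_eq, pvB_eq rounds hr, pvDivLoop_sorted_eq rounds hr1]
    rw [PySem.List.foldl_congr_mem (pvDivList rounds) (pvBodyA rounds) (pvBodyB rounds) []
      (fun acc k hk => pvBody_congr rounds hr1 acc k hk)]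
    have hpw := pvValid_pairwise rounds hr1
    rw [PySem.List.sorted_eq_self_of_pairwise _ _ (hpw.imp le_of_lt)]
    rw [min?_of_pairwise _ (hpw.imp le_of_lt)]
    cases List.foldl (pvBodyB rounds) [] (pvDivList rounds) <;> rfl

-- ===== VERDICT (by name: the statement is the Claim_ definition above) =====
theorem league_phase_valid_participant_counts_spec : Claim_equal_league_phase_valid_participant_counts := by
  intro rounds _
  exact pv_main rounds
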